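-- pv_equiv track=rewrite | github.com/Vildsvinet/AdventOfCode | 2023/l9.py | procces_report
-- ===== SOURCE A (Python) =====
-- def calculate_deltas(row):
--     deltas = []
--     for e in range(len(row) - 1):
--         d = row[e + 1] - row[e]
--         deltas.append(d)
--     return deltas
--
-- def procces_report(report):
--     history = []
--     current = report.copy()
--     while not all([x == 0 for x in current]):
--         history.append(current)
--         current = calculate_deltas(current)
--     history.append(current)
--     return history
-- ===== SOURCE B (Python) =====
-- def procces_report(report):
--     def deltas(row):
--         return [b - a for a, b in zip(row, row[1:])]
--
--     def build(current):
--         if all(x == 0 for x in current):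
--             return [current]
--         return [current] + build(deltas(current))
--
--     return build(report.copy())
-- ===== Notes on version B (the rewrite author's own statement) =====
-- stated objective: simpler
-- what changed: Replaces the explicit while-loop with accumulator list by a recursive build over the pyramid rows, and computes each delta row with zip of adjacent pairs instead of indexing over range(len-1).
import Mathlib
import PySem

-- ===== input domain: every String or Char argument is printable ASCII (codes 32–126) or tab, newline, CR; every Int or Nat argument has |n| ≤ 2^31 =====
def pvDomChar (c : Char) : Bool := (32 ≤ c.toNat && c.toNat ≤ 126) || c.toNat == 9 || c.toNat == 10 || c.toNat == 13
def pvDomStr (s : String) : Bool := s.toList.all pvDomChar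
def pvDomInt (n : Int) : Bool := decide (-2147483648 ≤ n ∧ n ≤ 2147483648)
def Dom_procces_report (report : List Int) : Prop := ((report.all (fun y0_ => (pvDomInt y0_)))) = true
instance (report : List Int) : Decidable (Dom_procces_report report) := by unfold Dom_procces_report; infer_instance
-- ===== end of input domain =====

-- B is a recursive decomposition of A's while-loop, with delta rows via adjacent-pair zip; return value equivalence (A does not mutate its argument either).

-- ===== PORT A =====
def calculate_deltas (row : List Int) : List Int :=
  (PySem.List.pyRange 0 ((row.length : Int) - 1) 1).foldl
    (fun deltas e =>
      deltas ++ [PySem.List.pyGetD row (e + 1) 0 - PySem.List.pyGetD row e 0]) []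

-- length fact the while-loop's termination cites
theorem calculate_deltas_length (row : List Int) :
    (calculate_deltas row).length = row.length - 1 := by
  unfold calculate_deltas
  rw [PySem.List.foldl_append_singleton_eq_map]
  simp [PySem.List.length_pyRange_one]

def procces_reportLoop (history : List (List Int)) (current : List Int) : List (List Int) :=
  if (current.map (fun x => x == 0)).all id then
    history ++ [current]
  else
    procces_reportLoop (history ++ [current]) (calculate_deltas current)
termination_by current.length
decreasing_by
  rename_i h
  have hne : current ≠ [] := by rintro rfl; simp at h
  have h1 : 0 < current.length := List.length_pos_iff.mpr hne
  have h2 := calculate_deltas_length current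
  omega

def procces_report (report : List Int) : List (List Int) :=
  procces_reportLoop [] report

-- ===== PORT B =====
def deltas_alt (row : List Int) : List Int :=
  List.zipWith (fun a b => b - a) row (row.drop 1)

theorem deltas_alt_length (row : List Int) :
    (deltas_alt row).length = row.length - 1 := by
  unfold deltas_alt
  simp

def buildPyramid (current : List Int) : List (List Int) :=
  if current.all (fun x => x == 0) then [current]
  else current :: buildPyramid (deltas_alt current)
termination_by current.length
decreasing_by
  rename_i h
  have hne : current ≠ [] := by rintro rfl; simp at h
  have h1 : 0 < current.length := List.length_pos_iff.mpr hne
  have h2 := deltas_alt_length current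
  omega

def procces_report_alt (report : List Int) : List (List Int) :=
  buildPyramid report

-- ===== PRECONDITION & SPEC =====
def Spec_procces_report (report : List Int) (out : List (List Int)) : Prop := out = procces_report_alt report
instance (report : List Int) (out : List (List Int)) : Decidable (Spec_procces_report report out) := by unfold Spec_procces_report; infer_instance

-- ===== CLAIM (what is proved, stated in full; the proofs are below) =====
def Claim_equal_procces_report : Prop := ∀ (report : List Int), Dom_procces_report report → Spec_procces_report report (procces_report report)

-- ===== LEMMAS AND PROOFS =====

-- the two delta computations agree element-by-element
theorem calculate_deltas_eq (row : List Int) : calculate_deltas row = deltas_alt row := by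
  unfold calculate_deltas
  rw [PySem.List.foldl_append_singleton_eq_map]
  rw [PySem.List.pyRange_one]
  apply List.ext_getElem
  · simp [deltas_alt_length]
  · intro k hk1 hk2
    have hk : k < row.length - 1 := by
      simpa using hk1
    simp only [List.nil_append, List.map_map, List.getElem_map, List.getElem_range,
      Function.comp_apply, deltas_alt, List.getElem_zipWith, List.getElem_drop]
    have e1 : (0 : Int) + (k : Int) + 1 = ((k + 1 : Nat) : Int) := by push_cast; ring
    have e2 : (0 : Int) + (k : Int) = ((k : Nat) : Int) := by ring
    rw [e1, e2, PySem.List.pyGetD_natCast, PySem.List.pyGetD_natCast,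
      List.getD_eq_getElem _ _ (by omega), List.getD_eq_getElem _ _ (by omega)]
    simp [Nat.add_comm]

-- the two termination tests agree
theorem cond_eq (current : List Int) :
    (current.map (fun x => x == 0)).all id = current.all (fun x => x == 0) := by
  simp [List.all_map]

-- the loop with accumulator equals the recursion, prefixed by the accumulator
theorem loop_eq_build (n : Nat) : ∀ (current : List Int), current.length = n →
    ∀ history, procces_reportLoop history current = history ++ buildPyramid current := by
  induction n using Nat.strong_induction_on with
  | _ n ih =>
    intro current hlen history
    rw [procces_reportLoop, buildPyramid, cond_eq]
    by_cases h : current.all (fun x => x == 0)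
    · simp [h]
    · simp only [h, Bool.false_eq_true, if_false]
      have hne : current ≠ [] := by rintro rfl; simp at h
      have h1 : 0 < current.length := List.length_pos_iff.mpr hne
      have h2 := calculate_deltas_length current
      rw [ih (calculate_deltas current).length (by omega) _ rfl, calculate_deltas_eq]
      simp

-- ===== VERDICT (by name: the statement is the Claim_ definition above) =====
theorem procces_report_spec : Claim_equal_procces_report := by
  intro report _
  unfold Spec_procces_report procces_report procces_report_alt
  simpa using loop_eq_build report.length report rfl []
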